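-- pv_equiv track=rewrite | github.com/ErikDevlop/AdventOfCode | 2019/src/day14.py | sum_chemicals
-- ===== SOURCE A (Python) =====
-- def sum_chemicals(reactions):
--     summed_elements = list()
--     for reaction in reactions:
--         if reaction[1] in [element[1] for element in summed_elements]:
--             for index, element in enumerate(summed_elements):
--                 if element[1] == reaction[1]:
--                     summed_elements[index] = (reaction[0] + element[0], reaction[1])
--         else:
--             summed_elements.append(reaction)
--     return summed_elements
-- ===== SOURCE B (Python) =====
-- def sum_chemicals(reactions):
--     names = []
--     for _, name in reactions:
--         if name not in names:
--             names.append(name)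
--     return [(sum(q for q, n in reactions if n == name), name) for name in names]
-- ===== Notes on version B (the rewrite author's own statement) =====
-- stated objective: alternative
-- what changed: B first collects the distinct chemical names in first-seen order, then aggregates each name's total with one sum over the whole input, instead of A's single pass that rescans and rewrites its accumulator in place for every reaction.
import Mathlib
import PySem

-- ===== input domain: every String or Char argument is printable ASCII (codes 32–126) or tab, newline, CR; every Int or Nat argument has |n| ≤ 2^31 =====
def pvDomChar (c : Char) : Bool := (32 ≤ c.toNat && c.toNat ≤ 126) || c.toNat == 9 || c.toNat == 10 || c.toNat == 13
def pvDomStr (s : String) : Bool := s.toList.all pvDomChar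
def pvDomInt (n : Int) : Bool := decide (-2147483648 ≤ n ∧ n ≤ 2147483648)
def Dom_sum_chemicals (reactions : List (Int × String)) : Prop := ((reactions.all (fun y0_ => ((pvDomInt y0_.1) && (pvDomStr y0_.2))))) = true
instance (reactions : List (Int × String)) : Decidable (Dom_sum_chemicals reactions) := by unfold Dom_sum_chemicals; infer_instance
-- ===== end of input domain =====

-- B collects the distinct names first and then sums each name's total over the whole
-- input, instead of A's single pass that rescans/rewrites its accumulator per reaction
-- (alternative decomposition, same asymptotic cost).

-- ===== PORT A =====
-- one step of A's loop body: membership test on the snd-projection, then either the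
-- enumerate-and-update pass or an append
def aStep (acc : List (Int × String)) (r : Int × String) : List (Int × String) :=
  if r.2 ∈ acc.map (fun e => e.2) then
    acc.map (fun e => if e.2 = r.2 then (r.1 + e.1, r.2) else e)
  else acc ++ [r]

def sum_chemicals (reactions : List (Int × String)) : List (Int × String) :=
  reactions.foldl aStep []

-- ===== PORT B =====
-- first pass: distinct names in first-seen order
def bNames (reactions : List (Int × String)) : List String :=
  reactions.foldl (fun ns r => if r.2 ∈ ns then ns else ns ++ [r.2]) []

def sum_chemicals_alt (reactions : List (Int × String)) : List (Int × String) :=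
  (bNames reactions).map
    (fun name => (((reactions.filter (fun p => p.2 = name)).map Prod.fst).sum, name))

-- ===== PRECONDITION & SPEC =====
def Spec_sum_chemicals (reactions : List (Int × String)) (out : List (Int × String)) : Prop := out = sum_chemicals_alt reactions
instance (reactions : List (Int × String)) (out : List (Int × String)) : Decidable (Spec_sum_chemicals reactions out) := by unfold Spec_sum_chemicals; infer_instance

-- ===== CLAIM (what is proved, stated in full; the proofs are below) =====
def Claim_equal_sum_chemicals : Prop := ∀ (reactions : List (Int × String)), Dom_sum_chemicals reactions → Spec_sum_chemicals reactions (sum_chemicals reactions)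

-- ===== LEMMAS AND PROOFS =====

def sumOf (xs : List (Int × String)) (n : String) : Int :=
  ((xs.filter (fun p => p.2 = n)).map Prod.fst).sum

lemma bNames_append (xs : List (Int × String)) (r : Int × String) :
    bNames (xs ++ [r]) = if r.2 ∈ bNames xs then bNames xs else bNames xs ++ [r.2] := by
  simp [bNames, List.foldl_append]

lemma mem_bNames (xs : List (Int × String)) (n : String) :
    n ∈ bNames xs ↔ n ∈ xs.map (fun p => p.2) := by
  induction xs using List.reverseRecOn with
  | nil => simp [bNames]
  | append_singleton xs r ih =>
      rw [bNames_append]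
      split_ifs with h
      · constructor
        · intro hn; simp [ih.mp hn]
        · intro hn
          rcases (by simpa using hn : n ∈ List.map (fun p => p.2) xs ∨ n = r.2) with h1 | h1
          · exact ih.mpr h1
          · rw [h1]; exact h
      · simp [ih]

lemma sumOf_append (xs : List (Int × String)) (r : Int × String) (n : String) :
    sumOf (xs ++ [r]) n = sumOf xs n + (if r.2 = n then r.1 else 0) := by
  by_cases h : r.2 = n <;> simp [sumOf, List.filter_append, h]

lemma sumOf_not_mem (xs : List (Int × String)) (n : String)
    (h : n ∉ xs.map (fun p => p.2)) : sumOf xs n = 0 := by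
  have : xs.filter (fun p => p.2 = n) = [] := by
    rw [List.filter_eq_nil_iff]
    intro p hp hpn
    exact h (List.mem_map.mpr ⟨p, hp, by simpa using hpn⟩)
  simp [sumOf, this]

lemma main_invariant (xs : List (Int × String)) :
    xs.foldl aStep [] = (bNames xs).map (fun n => (sumOf xs n, n)) := by
  induction xs using List.reverseRecOn with
  | nil => simp [bNames]
  | append_singleton xs r ih =>
      rw [List.foldl_append, List.foldl_cons, List.foldl_nil, ih, bNames_append]
      have hsnd : ((bNames xs).map (fun n => (sumOf xs n, n))).map (fun e => e.2) = bNames xs := by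
        simp [Function.comp_def]
      by_cases h : r.2 ∈ bNames xs
      · simp only [if_pos h, aStep, hsnd, List.map_map]
        apply List.map_congr_left
        intro n _
        by_cases hn : n = r.2
        · subst hn
          simp [sumOf_append, Int.add_comm]
        · have hn' : ¬ r.2 = n := fun hh => hn hh.symm
          simp [Function.comp, hn, hn', sumOf_append]
      · simp only [if_neg h, aStep, hsnd, List.map_append]
        congr 1
        · apply List.map_congr_left
          intro n hn
          have : r.2 ≠ n := fun hh => h (hh ▸ hn)
          simp [sumOf_append, this]
        · have h0 : sumOf xs r.2 = 0 := sumOf_not_mem _ _ ((mem_bNames xs r.2).not.mp h)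
          simp [sumOf_append, h0]

-- ===== VERDICT (by name: the statement is the Claim_ definition above) =====
theorem sum_chemicals_spec : Claim_equal_sum_chemicals := by
  intro reactions _
  unfold Spec_sum_chemicals sum_chemicals sum_chemicals_alt
  simpa [sumOf] using main_invariant reactions
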